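-- pv_equiv track=rewrite | github.com/YJL33/LeetCode | current_session/777.py | canTransform_TLE
-- ===== SOURCE A (Python) =====
-- def canTransform_TLE(start, end):
--     """
--     :type start: str
--     :type end: str
--     :rtype: bool
--     """
--     # use dfs
--     visit = {}
--     stack = [start]
--
--     chk = ["X", "R", "L"]
--     while chk:
--         c = chk.pop()
--         if start.count(c) != end.count(c):
--             return False
--
--     while stack:
--         tmp = stack.pop()
--         if tmp not in visit:
--             if tmp == end:              # comparing itself costs O(n)
--                 return True
--             # flip all XL -> LX and add to stack
--             for i in range(len(tmp)-1):
--                 if tmp[i:i+2] == "XL":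
--                     new = tmp[:i] + "LX" + tmp[i+2:]
--                     stack += new,
--                     # print "1st", stack
--             # flip all RX -> XR and add to stack
--             for i in range(len(tmp)-1):
--                 if tmp[i:i+2] == "RX":
--                     new = tmp[:i] + "XR" + tmp[i+2:]
--                     stack += new,
--                     # print "2nd", stack
--             visit[tmp] = True
--
--     return False
-- ===== SOURCE B (Python) =====
-- def canTransform_TLE(start, end):
--     # Two-pointer scan: equal length, the sequences of non-'X' characters must
--     # match, an 'L' may only move left, an 'R' may only move right, and any
--     # other character cannot move at all.
--     if len(start) != len(end):
--         return False
--     n = len(start)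
--     i = j = 0
--     while True:
--         while i < n and start[i] == 'X':
--             i += 1
--         while j < n and end[j] == 'X':
--             j += 1
--         if i == n or j == n:
--             return i == n and j == n
--         a = start[i]
--         if a != end[j]:
--             return False
--         if a == 'L':
--             if j > i:
--                 return False
--         elif a == 'R':
--             if j < i:
--                 return False
--         else:
--             if i != j:
--                 return False
--         i += 1
--         j += 1
-- ===== Notes on version B (the rewrite author's own statement) =====
-- stated objective: faster
-- what changed: Replaced the exhaustive DFS over all strings reachable by XL->LX / RX->XR rewrites (with a visited set) by a single two-pointer scan that matches the non-'X' characters of the two strings and checks that each 'L' only moves left, each 'R' only moves right and any other character stays in place.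
import Mathlib
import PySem

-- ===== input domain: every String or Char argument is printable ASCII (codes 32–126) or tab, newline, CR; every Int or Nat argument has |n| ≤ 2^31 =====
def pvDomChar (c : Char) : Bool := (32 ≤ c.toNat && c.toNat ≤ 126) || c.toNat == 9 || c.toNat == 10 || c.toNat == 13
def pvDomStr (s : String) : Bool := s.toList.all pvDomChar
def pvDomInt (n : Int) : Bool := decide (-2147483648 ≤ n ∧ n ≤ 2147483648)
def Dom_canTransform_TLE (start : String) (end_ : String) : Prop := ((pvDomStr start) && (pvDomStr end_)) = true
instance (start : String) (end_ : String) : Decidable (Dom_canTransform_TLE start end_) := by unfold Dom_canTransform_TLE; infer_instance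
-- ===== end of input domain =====

-- B replaces A's exhaustive DFS over all XL→LX / RX→XR rewrites by a linear two-pointer
-- scan of the non-'X' characters (objective: faster — asymptotic).

-- ===== PORT A =====
-- A's inner loops `for i in range(len(tmp)-1): if tmp[i:i+2] == pat: stack += tmp[:i]+rep+tmp[i+2:],`
-- (states kept as List Char, the code points of the Python strings):
def pvFlips (tmp pat rep : List Char) : List (List Char) :=
  (PySem.List.pyRange 0 (PySem.List.len tmp - 1) 1).foldl
    (fun acc i =>
      if PySem.List.slice tmp (some i) (some (i + 2)) = pat then
        acc ++ [PySem.List.slice tmp none (some i) ++ rep ++ PySem.List.slice tmp (some (i + 2)) none]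
      else acc) []

-- the two flip loops of one iteration, in A's order (XL→LX first, then RX→XR)
def pvSuccs (tmp : List Char) : List (List Char) :=
  pvFlips tmp ['X', 'L'] ['L', 'X'] ++ pvFlips tmp ['R', 'X'] ['X', 'R']

-- fuel guard that makes A's `while stack` loop structurally total (it only ever counts
-- down; the proofs show it never runs out when the loop's answer is True)
def pvFuel (n : Nat) : Nat := (Nat.factorial n + 1) * (2 * n + 4) + 4

-- A's `while stack` loop.  The Python list is represented top-of-stack-first, so
-- `stack.pop()` is the head and the new states pushed during one iteration are
-- prepended in reverse order (same pop order as Python's repeated appends).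
def pvBfs (e : List Char) : Nat → List (List Char) → PySem.Dict (List Char) Bool → Bool
  | 0, _, _ => false
  | _ + 1, [], _ => false
  | fuel + 1, tmp :: rest, visit =>
    if visit.contains tmp then pvBfs e fuel rest visit
    else if tmp = e then true
    else pvBfs e fuel ((pvSuccs tmp).reverse ++ rest) (visit.insert tmp true)

-- the `while chk` loop unrolled (chk.pop() yields "L", then "R", then "X");
-- str.count of a single-character needle is exactly the character count (List.count) — exact
def canTransform_TLE (start : String) (end_ : String) : Bool :=
  let s := start.toList
  let e := end_.toList
  if s.count 'L' ≠ e.count 'L' then false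
  else if s.count 'R' ≠ e.count 'R' then false
  else if s.count 'X' ≠ e.count 'X' then false
  else pvBfs e (pvFuel s.length) [s] PySem.Dict.empty

-- ===== PORT B =====
-- Source B's two inner `while … == 'X'` skip loops (returns the remaining suffix and the index)
def pvSkipX : List Char → Nat → List Char × Nat
  | [], i => ([], i)
  | c :: t, i => if c = 'X' then pvSkipX t (i + 1) else (c :: t, i)

theorem pvSkipX_fst_length (s : List Char) (i : Nat) : (pvSkipX s i).1.length ≤ s.length := by
  induction s generalizing i with
  | nil => simp [pvSkipX]
  | cons c t ih =>
    simp only [pvSkipX]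
    split
    · exact (ih (i + 1)).trans (by simp)
    · simp

-- Source B's main `while True` loop (i, j are the two cursors)
def pvGo (s t : List Char) (i j : Nat) : Bool :=
  match hs : pvSkipX s i, ht : pvSkipX t j with
  | ([], _), ([], _) => true
  | ([], _), (_ :: _, _) => false
  | (_ :: _, _), ([], _) => false
  | (a :: s', i'), (b :: t', j') =>
    if a ≠ b then false
    else if a = 'L' then (if i' < j' then false else pvGo s' t' (i' + 1) (j' + 1))
    else if a = 'R' then (if j' < i' then false else pvGo s' t' (i' + 1) (j' + 1))
    else (if i' ≠ j' then false else pvGo s' t' (i' + 1) (j' + 1))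
termination_by s.length
decreasing_by
  all_goals
    have h := pvSkipX_fst_length s i
    rw [hs] at h
    simp at h
    omega

def canTransform_TLE_alt (start : String) (end_ : String) : Bool :=
  if PySem.Str.len start ≠ PySem.Str.len end_ then false
  else pvGo start.toList end_.toList 0 0

-- ===== PRECONDITION & SPEC =====
def Spec_canTransform_TLE (start : String) (end_ : String) (out : Bool) : Prop := out = canTransform_TLE_alt start end_
instance (start : String) (end_ : String) (out : Bool) : Decidable (Spec_canTransform_TLE start end_ out) := by unfold Spec_canTransform_TLE; infer_instance

-- ===== CLAIM (what is proved, stated in full; the proofs are below) =====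
def Claim_equal_canTransform_TLE : Prop := ∀ (start : String) (end_ : String), Dom_canTransform_TLE start end_ → Spec_canTransform_TLE start end_ (canTransform_TLE start end_)

-- ===== LEMMAS AND PROOFS =====

-- one XL→LX or RX→XR rewrite
def SwapStep (s t : List Char) : Prop :=
  (∃ a b, s = a ++ 'X' :: 'L' :: b ∧ t = a ++ 'L' :: 'X' :: b) ∨
  (∃ a b, s = a ++ 'R' :: 'X' :: b ∧ t = a ++ 'X' :: 'R' :: b)

def Reach (s t : List Char) : Prop := Relation.ReflTransGen SwapStep s t

-- the non-'X' characters of l with their positions (positions offset by k)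
def nonX : List Char → Nat → List (Nat × Char)
  | [], _ => []
  | c :: t, k => if c = 'X' then nonX t (k + 1) else (k, c) :: nonX t (k + 1)

-- matching pair of non-'X' characters: same char, 'L' only moved left, 'R' only right
def pairOK (p q : Nat × Char) : Prop :=
  p.2 = q.2 ∧ (if p.2 = 'L' then q.1 ≤ p.1 else if p.2 = 'R' then p.1 ≤ q.1 else p.1 = q.1)

def Cond (s e : List Char) : Prop :=
  s.length = e.length ∧ List.Forall₂ pairOK (nonX s 0) (nonX e 0)

def leadR : List Char → Nat
  | [] => 0
  | c :: t => if c = 'R' then leadR t + 1 else 0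

def leadX : List Char → Nat
  | [] => 0
  | c :: t => if c = 'X' then leadX t + 1 else 0

def mu2 (s e : List Char) : Nat :=
  match e with
  | [] => 0
  | c :: _ => if c = 'X' then leadR s else leadX s

theorem pvSkipX_nonX (s : List Char) (i : Nat) :
    nonX (pvSkipX s i).1 (pvSkipX s i).2 = nonX s i := by
  induction s generalizing i with
  | nil => simp [pvSkipX]
  | cons c t ih =>
    by_cases hc : c = 'X'
    · simp [pvSkipX, hc, nonX, ih]
    · simp [pvSkipX, hc, nonX]

theorem pvSkipX_head_ne (s : List Char) (i : Nat) {c : Char} {r : List Char}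
    (h : (pvSkipX s i).1 = c :: r) : c ≠ 'X' := by
  induction s generalizing i with
  | nil => simp [pvSkipX] at h
  | cons a t ih =>
    by_cases ha : a = 'X'
    · rw [show pvSkipX (a :: t) i = pvSkipX t (i + 1) by simp [pvSkipX, ha]] at h
      exact ih _ h
    · rw [show pvSkipX (a :: t) i = (a :: t, i) by simp [pvSkipX, ha]] at h
      cases h; exact ha

theorem pvGo_iff (s t : List Char) (i j : Nat) :
    pvGo s t i j = true ↔ List.Forall₂ pairOK (nonX s i) (nonX t j) := by
  fun_induction pvGo s t i j with
  | case1 s t i j i0 j0 hs ht =>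
    rw [← pvSkipX_nonX s i, ← pvSkipX_nonX t j, hs, ht]
    simp [nonX]
  | case2 s t i j i0 b t' j0 hs ht =>
    have hb : b ≠ 'X' := pvSkipX_head_ne t j (by rw [ht])
    rw [← pvSkipX_nonX s i, ← pvSkipX_nonX t j, hs, ht]
    simp [nonX, hb]
  | case3 s t i j a s' i0 j0 hs ht =>
    have ha : a ≠ 'X' := pvSkipX_head_ne s i (by rw [hs])
    rw [← pvSkipX_nonX s i, ← pvSkipX_nonX t j, hs, ht]
    simp [nonX, ha]
  | case4 s t i j a s' i' b t' j' hs ht hne =>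
    have ha : a ≠ 'X' := pvSkipX_head_ne s i (by rw [hs])
    have hb : b ≠ 'X' := pvSkipX_head_ne t j (by rw [ht])
    rw [← pvSkipX_nonX s i, ← pvSkipX_nonX t j, hs, ht]
    simp only [nonX, if_neg ha, if_neg hb, List.forall₂_cons, Bool.false_eq_true, false_iff]
    rintro ⟨⟨h1, -⟩, -⟩
    exact hne h1
  | case5 s t i j s' i' b t' j' ht hlt hs heq =>
    have hb : b ≠ 'X' := pvSkipX_head_ne t j (by rw [ht])
    rw [← pvSkipX_nonX s i, ← pvSkipX_nonX t j, hs, ht]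
    simp only [nonX, if_neg hb, if_neg (by decide : ¬ ('L' : Char) = 'X'), List.forall₂_cons,
      Bool.false_eq_true, false_iff]
    rintro ⟨⟨h1, h2⟩, -⟩
    simp at h2
    omega
  | case6 s t i j s' i' b t' j' ht hlt hs heq ih =>
    have hb : b ≠ 'X' := pvSkipX_head_ne t j (by rw [ht])
    have hbL : b = 'L' := by by_contra h; exact heq (fun he => h he.symm)
    subst hbL
    rw [← pvSkipX_nonX s i, ← pvSkipX_nonX t j, hs, ht]
    simp only [nonX, if_neg (by decide : ¬ ('L' : Char) = 'X'), List.forall₂_cons]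
    rw [ih]
    constructor
    · intro h; exact ⟨⟨rfl, by simp; omega⟩, h⟩
    · rintro ⟨-, h⟩; exact h
  | case7 s t i j s' i' b t' j' ht hlt hs heq hne =>
    have hb : b ≠ 'X' := pvSkipX_head_ne t j (by rw [ht])
    rw [← pvSkipX_nonX s i, ← pvSkipX_nonX t j, hs, ht]
    simp only [nonX, if_neg hb, if_neg (by decide : ¬ ('R' : Char) = 'X'), List.forall₂_cons,
      Bool.false_eq_true, false_iff]
    rintro ⟨⟨h1, h2⟩, -⟩
    simp at h2
    omega
  | case8 s t i j s' i' b t' j' ht hlt hs heq hne ih =>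
    have hb : b ≠ 'X' := pvSkipX_head_ne t j (by rw [ht])
    have hbR : b = 'R' := by by_contra h; exact heq (fun he => h he.symm)
    subst hbR
    rw [← pvSkipX_nonX s i, ← pvSkipX_nonX t j, hs, ht]
    simp only [nonX, if_neg (by decide : ¬ ('R' : Char) = 'X'), List.forall₂_cons]
    rw [ih]
    constructor
    · intro h; exact ⟨⟨rfl, by simp; omega⟩, h⟩
    · rintro ⟨-, h⟩; exact h
  | case9 s t i j a s' i' b t' j' hs ht heq hL hR hne =>
    have ha : a ≠ 'X' := pvSkipX_head_ne s i (by rw [hs])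
    have hb : b ≠ 'X' := pvSkipX_head_ne t j (by rw [ht])
    have hab : a = b := by by_contra h; exact heq h
    rw [← pvSkipX_nonX s i, ← pvSkipX_nonX t j, hs, ht]
    simp only [nonX, if_neg ha, if_neg hb, List.forall₂_cons, Bool.false_eq_true, false_iff]
    rintro ⟨⟨-, h2⟩, -⟩
    simp [hL, hR] at h2
    omega
  | case10 s t i j a s' i' b t' j' hs ht heq hL hR hne ih =>
    have ha : a ≠ 'X' := pvSkipX_head_ne s i (by rw [hs])
    have hb : b ≠ 'X' := pvSkipX_head_ne t j (by rw [ht])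
    have hab : a = b := by by_contra h; exact heq h
    subst hab
    have hij : i' = j' := by omega
    subst hij
    rw [← pvSkipX_nonX s i, ← pvSkipX_nonX t j, hs, ht]
    simp only [nonX, if_neg ha, List.forall₂_cons]
    rw [ih]
    constructor
    · intro h; exact ⟨⟨rfl, by simp [hL, hR]⟩, h⟩
    · rintro ⟨-, h⟩; exact h

theorem alt_iff (start end_ : String) :
    canTransform_TLE_alt start end_ = true ↔ Cond start.toList end_.toList := by
  unfold canTransform_TLE_alt
  split
  · rename_i h
    simp only [Bool.false_eq_true, false_iff]
    intro hc
    simp only [PySem.Str.len_eq, ne_eq] at h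
    exact h (by exact_mod_cast hc.1)
  · rename_i h
    simp only [PySem.Str.len_eq, ne_eq, not_not] at h
    rw [pvGo_iff]
    exact ⟨fun hf => ⟨by exact_mod_cast h, hf⟩, fun hc => hc.2⟩

theorem nonX_append (u v : List Char) (k : Nat) :
    nonX (u ++ v) k = nonX u k ++ nonX v (k + u.length) := by
  induction u generalizing k with
  | nil => simp [nonX]
  | cons c t ih =>
    by_cases hc : c = 'X' <;>
      simp [nonX, hc, ih, Nat.add_assoc, Nat.add_comm 1 t.length]

theorem nonX_length_le (l : List Char) (k : Nat) : (nonX l k).length ≤ l.length := by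
  induction l generalizing k with
  | nil => simp [nonX]
  | cons c t ih =>
    by_cases hc : c = 'X' <;> simp [nonX, hc]
    · exact (ih (k + 1)).trans (by omega)
    · exact ih (k + 1)

theorem nonX_ge (l : List Char) (k : Nat) : ∀ p ∈ nonX l k, k ≤ p.1 := by
  induction l generalizing k with
  | nil => simp [nonX]
  | cons c t ih =>
    intro p hp
    by_cases hc : c = 'X' <;> simp [nonX, hc] at hp
    · exact le_trans (by omega) (ih (k + 1) p hp)
    · rcases hp with h | h
      · subst h; exact le_rfl
      · exact le_trans (by omega) (ih (k + 1) p h)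

theorem nonX_pairwise (l : List Char) (k : Nat) :
    (nonX l k).Pairwise (fun p q => p.1 < q.1) := by
  induction l generalizing k with
  | nil => simp [nonX]
  | cons c t ih =>
    by_cases hc : c = 'X' <;> simp [nonX, hc]
    · exact ih (k + 1)
    · exact ⟨fun a b hab => lt_of_lt_of_le (by omega) (nonX_ge t (k + 1) (a, b) hab), ih (k + 1)⟩

theorem nonX_shift (l : List Char) (k : Nat) :
    nonX l (k + 1) = (nonX l k).map (fun p => (p.1 + 1, p.2)) := by
  induction l generalizing k with
  | nil => simp [nonX]
  | cons c t ih =>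
    by_cases hc : c = 'X' <;> simp [nonX, hc, ih]

theorem pairOK_shift (p q : Nat × Char) :
    pairOK (p.1 + 1, p.2) (q.1 + 1, q.2) ↔ pairOK p q := by
  unfold pairOK
  constructor <;> rintro ⟨h1, h2⟩ <;> refine ⟨h1, ?_⟩ <;> split_ifs at h2 ⊢ <;> omega

theorem forall₂_shift_iff (u v : List (Nat × Char)) :
    List.Forall₂ pairOK (u.map (fun p => (p.1 + 1, p.2))) (v.map (fun p => (p.1 + 1, p.2))) ↔
      List.Forall₂ pairOK u v := by
  rw [List.forall₂_map_left_iff, List.forall₂_map_right_iff]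
  constructor <;> intro h <;> refine h.imp ?_ <;> intro a b hab
  · exact (pairOK_shift a b).mp hab
  · exact (pairOK_shift a b).mpr hab

theorem forall₂_split {α β : Type} {R : α → β → Prop} :
    ∀ {A : List β} {u : List α} {p : β} {B : List β}, List.Forall₂ R u (A ++ p :: B) →
      ∃ u₁ x u₂, u = u₁ ++ x :: u₂ ∧ List.Forall₂ R u₁ A ∧ R x p ∧ List.Forall₂ R u₂ B := by
  intro A
  induction A with
  | nil =>
    intro u p B h
    rcases List.forall₂_cons_right_iff.mp h with ⟨x, u', hxp, hu', rfl⟩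
    exact ⟨[], x, u', rfl, List.Forall₂.nil, hxp, hu'⟩
  | cons a A ih =>
    intro u p B h
    rcases List.forall₂_cons_right_iff.mp h with ⟨x0, u', hx0, hu', rfl⟩
    rcases ih hu' with ⟨u₁, x, u₂, rfl, h1, h2, h3⟩
    exact ⟨x0 :: u₁, x, u₂, rfl, List.Forall₂.cons hx0 h1, h2, h3⟩

theorem forall₂_join {α β : Type} {R : α → β → Prop} :
    ∀ {A : List β} {u₁ : List α} {x : α} {p : β} {u₂ : List α} {B : List β},
      List.Forall₂ R u₁ A → R x p → List.Forall₂ R u₂ B →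
      List.Forall₂ R (u₁ ++ x :: u₂) (A ++ p :: B) := by
  intro A u₁ x p u₂ B h1 h2 h3
  induction h1 with
  | nil => exact List.Forall₂.cons h2 h3
  | cons hab _ ih => exact List.Forall₂.cons hab ih

theorem cond_refl (s : List Char) : Cond s s := by
  refine ⟨rfl, List.forall₂_same.mpr fun p _ => ⟨rfl, ?_⟩⟩
  split_ifs <;> omega

theorem cond_step {s t t' : List Char} (h : Cond s t) (hs : SwapStep t t') : Cond s t' := by
  obtain ⟨hlen, hf⟩ := h
  rcases hs with ⟨a, b, rfl, rfl⟩ | ⟨a, b, rfl, rfl⟩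
  · refine ⟨by simpa using hlen, ?_⟩
    rw [nonX_append] at hf ⊢
    simp only [nonX, reduceIte, if_neg (show ¬('L' : Char) = 'X' by decide)] at hf ⊢
    rw [show (0 : Nat) + a.length = a.length by omega] at hf ⊢
    rcases forall₂_split hf with ⟨u₁, x, u₂, hu, h1, h2, h3⟩
    rw [hu]
    refine forall₂_join h1 ⟨h2.1, ?_⟩ ?_
    · obtain ⟨hx2, hcond⟩ := h2
      simp only [hx2, reduceIte] at hcond ⊢
      omega
    · have : a.length + 1 + 1 = a.length + 2 := by omega
      simpa [this] using h3
  · refine ⟨by simpa using hlen, ?_⟩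
    rw [nonX_append] at hf ⊢
    simp only [nonX, reduceIte, if_neg (show ¬('R' : Char) = 'X' by decide)] at hf ⊢
    rw [show (0 : Nat) + a.length = a.length by omega] at hf ⊢
    rcases forall₂_split hf with ⟨u₁, x, u₂, hu, h1, h2, h3⟩
    rw [hu]
    refine forall₂_join h1 ⟨h2.1, ?_⟩ ?_
    · obtain ⟨hx2, hcond⟩ := h2
      simp only [hx2, reduceIte, if_neg (show ¬('R' : Char) = 'L' by decide)] at hcond ⊢
      omega
    · have : a.length + 1 + 1 = a.length + 2 := by omega
      simpa [this] using h3

theorem cond_of_reach {s t : List Char} (h : Reach s t) : Cond s t := by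
  induction h with
  | refl => exact cond_refl s
  | tail _ hstep ih => exact cond_step ih hstep

theorem step_cons {s t : List Char} (c : Char) (h : SwapStep s t) : SwapStep (c :: s) (c :: t) := by
  rcases h with ⟨a, b, rfl, rfl⟩ | ⟨a, b, rfl, rfl⟩
  · exact Or.inl ⟨c :: a, b, rfl, rfl⟩
  · exact Or.inr ⟨c :: a, b, rfl, rfl⟩

theorem reach_cons {s t : List Char} (c : Char) (h : Reach s t) : Reach (c :: s) (c :: t) :=
  Relation.ReflTransGen.lift (c :: ·) (fun _ _ hab => step_cons c hab) h

theorem step_perm {s t : List Char} (h : SwapStep s t) : s.Perm t := by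
  rcases h with ⟨a, b, rfl, rfl⟩ | ⟨a, b, rfl, rfl⟩ <;>
    exact (List.Perm.append_left a (List.Perm.swap _ _ b))

theorem reach_perm {s t : List Char} (h : Reach s t) : s.Perm t := by
  induction h with
  | refl => exact List.Perm.refl _
  | tail _ hstep ih => exact ih.trans (step_perm hstep)

-- e's first non-'X' char is 'L' at index j ≤ k, s starts with an 'X': move that 'L' one cell left
theorem moveL :
    ∀ (s2 : List Char) (k j : Nat) (v' : List (Nat × Char)),
      List.Forall₂ pairOK (nonX ('X' :: s2) k) ((j, 'L') :: v') → j ≤ k →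
      ∃ s1, SwapStep ('X' :: s2) s1 ∧ List.Forall₂ pairOK (nonX s1 k) ((j, 'L') :: v') ∧
        leadX s1 < leadX ('X' :: s2) ∧ s1.length = s2.length + 1 := by
  intro s2
  induction s2 with
  | nil => intro k j v' h hjk; exfalso; simp [nonX] at h
  | cons c rest ih =>
    intro k j v' h hjk
    by_cases hc : c = 'X'
    · subst hc
      have h' : List.Forall₂ pairOK (nonX ('X' :: rest) (k + 1)) ((j, 'L') :: v') := by
        simpa [nonX] using h
      obtain ⟨s1', hstep, hf, hlt, hlen⟩ := ih (k + 1) j v' h' (by omega)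
      refine ⟨'X' :: s1', step_cons _ hstep, by simpa [nonX] using hf, ?_, by simp [hlen]⟩
      simp only [leadX, reduceIte] at hlt ⊢
      omega
    · have hh : List.Forall₂ pairOK ((k + 1, c) :: nonX rest (k + 1 + 1)) ((j, 'L') :: v') := by
        simpa [nonX, hc] using h
      obtain ⟨hp, htail⟩ := List.forall₂_cons.mp hh
      have hcL : c = 'L' := hp.1
      subst hcL
      refine ⟨'L' :: 'X' :: rest, Or.inl ⟨[], rest, rfl, rfl⟩, ?_, ?_, by simp⟩
      · have hpk : pairOK (k, 'L') (j, 'L') := ⟨rfl, by simp; omega⟩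
        simpa [nonX] using List.Forall₂.cons hpk htail
      · simp [leadX]

-- s starts with a (run of) 'R' that must move right: move the last 'R' of the run one cell right
theorem runR :
    ∀ (s : List Char) (m : Nat) (v : List (Nat × Char)),
      List.Forall₂ pairOK (nonX s m) v →
      (∀ p ∈ v, m < p.1) → v.Pairwise (fun p q => p.1 < q.1) →
      (nonX s m).length < s.length →
      (∀ c r, s = c :: r → c ≠ 'X') → s ≠ [] →
      ∃ s1, SwapStep s s1 ∧ List.Forall₂ pairOK (nonX s1 m) v ∧
        leadR s1 < leadR s ∧ s1.length = s.length := by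
  intro s
  induction s with
  | nil => intro m v _ _ _ _ _ hne; exact absurd rfl hne
  | cons c rest ih =>
    intro m v hf hv hpw hlen hhead _
    have hc : c ≠ 'X' := hhead c rest rfl
    have hh : List.Forall₂ pairOK ((m, c) :: nonX rest (m + 1)) v := by simpa [nonX, hc] using hf
    obtain ⟨p0, v', hp0, htail, rfl⟩ := List.forall₂_cons_left_iff.mp hh
    have hp0m : m < p0.1 := hv p0 List.mem_cons_self
    have hcR : c = 'R' := by
      obtain ⟨he, hcond⟩ := hp0
      by_contra hR
      split_ifs at hcond with h1
      · have hle : p0.1 ≤ m := hcond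
        omega
      · have heq : m = p0.1 := hcond
        omega
    subst hcR
    cases rest with
    | nil =>
      exfalso
      simp [nonX] at hlen
    | cons d rest2 =>
      by_cases hd : d = 'X'
      · subst hd
        refine ⟨'X' :: 'R' :: rest2, Or.inr ⟨[], rest2, rfl, rfl⟩, ?_, ?_, by simp⟩
        · have hpk : pairOK (m + 1, 'R') p0 := by
            refine ⟨hp0.1, ?_⟩
            show if ('R' : Char) = 'L' then p0.1 ≤ m + 1
              else if ('R' : Char) = 'R' then m + 1 ≤ p0.1 else m + 1 = p0.1
            rw [if_neg (by decide), if_pos rfl]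
            omega
          have hre : nonX ('R' :: 'X' :: rest2) m = (m, 'R') :: nonX rest2 (m + 1 + 1) := by
            simp [nonX]
          have hre2 : nonX ('X' :: 'R' :: rest2) m = (m + 1, 'R') :: nonX rest2 (m + 1 + 1) := by
            simp [nonX]
          rw [hre2]
          rw [hre] at hf
          have htail2 : List.Forall₂ pairOK (nonX rest2 (m + 1 + 1)) v' := by
            simpa [nonX] using htail
          exact List.Forall₂.cons hpk htail2
        · simp [leadR]
      · have hb1 : ∀ p ∈ v', m + 1 < p.1 := by
          intro p hp
          have h1 := (List.pairwise_cons.mp hpw).1 p hp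
          omega
        have hb2 : v'.Pairwise (fun p q => p.1 < q.1) := (List.pairwise_cons.mp hpw).2
        have hb3 : (nonX (d :: rest2) (m + 1)).length < (d :: rest2).length := by
          have : (nonX ('R' :: d :: rest2) m).length
              = (nonX (d :: rest2) (m + 1)).length + 1 := by simp [nonX]
          simp only [List.length_cons] at hlen ⊢
          omega
        have hb4 : ∀ c' r', d :: rest2 = c' :: r' → c' ≠ 'X' := by
          rintro c' r' ⟨⟩ h; exact hd h
        obtain ⟨s1', hstep, hf', hlt, hlen'⟩ :=
          ih (m + 1) v' (by simpa [nonX, hd] using htail) hb1 hb2 hb3 hb4 (by simp)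
        refine ⟨'R' :: s1', step_cons _ hstep, ?_, ?_, by simp [hlen']⟩
        · have : nonX ('R' :: s1') m = (m, 'R') :: nonX s1' (m + 1) := by simp [nonX]
          rw [this]
          exact List.Forall₂.cons hp0 hf'
        · have e1 : leadR ('R' :: s1') = leadR s1' + 1 := by simp [leadR]
          have e2 : leadR ('R' :: d :: rest2) = leadR (d :: rest2) + 1 := by simp [leadR]
          omega

theorem leadR_le (s : List Char) : leadR s ≤ s.length := by
  induction s with
  | nil => simp [leadR]
  | cons c t ih => simp only [leadR, List.length_cons]; split <;> omega

theorem leadX_le (s : List Char) : leadX s ≤ s.length := by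
  induction s with
  | nil => simp [leadX]
  | cons c t ih => simp only [leadX, List.length_cons]; split <;> omega

theorem mu2_le (s e : List Char) : mu2 s e ≤ s.length := by
  cases e with
  | nil => simp [mu2]
  | cons c e' =>
    simp only [mu2]
    split
    · exact leadR_le s
    · exact leadX_le s

theorem measure_dec {L mu mu' n : Nat} (hm : (L + 1) * (L + 1 + 1) + mu ≤ n + 1)
    (hb : mu' ≤ L) : L * (L + 1) + mu' ≤ n := by
  have key : (L + 1) * (L + 1 + 1) = L * (L + 1) + 2 * L + 2 := by ring
  rw [key] at hm
  generalize hT : L * (L + 1) = T at hm ⊢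
  omega

theorem measure_same {T mu mu' n : Nat} (hm : T + mu ≤ n + 1) (hlt : mu' < mu) :
    T + mu' ≤ n := by omega

theorem cond_reach : ∀ (N : Nat) (s e : List Char),
    s.length * (s.length + 1) + mu2 s e ≤ N → Cond s e → Reach s e := by
  intro N
  induction N with
  | zero =>
    intro s e hm hc
    have hs0 : s.length = 0 := by
      by_contra h
      have h1 : 1 ≤ s.length := by omega
      have h2 := Nat.mul_le_mul h1 (show 1 ≤ s.length + 1 by omega)
      omega
    have hs : s = [] := List.length_eq_zero_iff.mp hs0
    subst hs
    have he : e = [] := List.length_eq_zero_iff.mp (by simpa using hc.1.symm)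
    subst he
    exact Relation.ReflTransGen.refl
  | succ n ih =>
    intro s e hm hc
    obtain ⟨hlen, hf⟩ := hc
    cases e with
    | nil =>
      have hs : s = [] := List.length_eq_zero_iff.mp (by simpa using hlen)
      subst hs
      exact Relation.ReflTransGen.refl
    | cons ce e' =>
      cases s with
      | nil => simp at hlen
      | cons cs s' =>
        have hlen' : s'.length = e'.length := by simpa using hlen
        by_cases hce : ce = 'X'
        · subst hce
          by_cases hcs : cs = 'X'
          · subst hcs
            have hf' : List.Forall₂ pairOK (nonX s' 0) (nonX e' 0) := by
              have h1 : List.Forall₂ pairOK (nonX s' 1) (nonX e' 1) := by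
                simpa [nonX] using hf
              rw [show (1 : Nat) = 0 + 1 from rfl, nonX_shift s' 0, nonX_shift e' 0] at h1
              exact (forall₂_shift_iff _ _).mp h1
            have hr : Reach s' e' := by
              refine ih s' e' ?_ ⟨hlen', hf'⟩
              refine measure_dec (by simpa using hm) (mu2_le s' e')
            exact reach_cons 'X' hr
          · have hXe : nonX ('X' :: e') 0 = nonX e' 1 := by simp [nonX]
            have hf2 : List.Forall₂ pairOK (nonX (cs :: s') 0) (nonX e' 1) := by rwa [hXe] at hf
            have hb3 : (nonX (cs :: s') 0).length < (cs :: s').length := by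
              have h1 := hf2.length_eq
              have h2 := nonX_length_le e' 1
              simp only [List.length_cons]
              omega
            obtain ⟨s1, hstep, hf1, hlt, hlen1⟩ :=
              runR (cs :: s') 0 (nonX e' 1) hf2
                (fun p hp => lt_of_lt_of_le Nat.zero_lt_one (nonX_ge e' 1 p hp))
                (nonX_pairwise e' 1) hb3
                (by intro c r hcr; injection hcr with h1 _; exact h1 ▸ hcs)
                (by simp)
            have hr : Reach s1 ('X' :: e') := by
              refine ih s1 _ ?_ ⟨by rw [hlen1]; simpa using hlen, by rwa [hXe]⟩
              have hmu1 : mu2 s1 ('X' :: e') = leadR s1 := by simp [mu2]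
              have hmu2 : mu2 (cs :: s') ('X' :: e') = leadR (cs :: s') := by simp [mu2]
              rw [hmu1, hlen1]
              rw [hmu2] at hm
              exact measure_same hm hlt
            exact Relation.ReflTransGen.head hstep hr
        · have hv : nonX (ce :: e') 0 = (0, ce) :: nonX e' 1 := by simp [nonX, hce]
          by_cases hcs : cs = 'X'
          · subst hcs
            rw [hv] at hf
            have hs0 : nonX ('X' :: s') 0 = nonX s' 1 := by simp [nonX]
            rw [hs0] at hf
            have hceL : ce = 'L' := by
              rcases List.forall₂_cons_right_iff.mp hf with ⟨x, u', hx, hu', hxe⟩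
              have hx1 : 1 ≤ x.1 := by
                refine nonX_ge s' 1 x ?_
                rw [hxe]
                exact List.mem_cons_self
              obtain ⟨he2, hcond⟩ := hx
              by_contra hL
              split_ifs at hcond with h1 h2
              · exact hL (he2.symm.trans h1)
              · have : x.1 ≤ 0 := hcond
                omega
              · have : x.1 = 0 := hcond
                omega
            subst hceL
            obtain ⟨s1, hstep, hf1, hlt, hlen1⟩ :=
              moveL s' 0 0 (nonX e' 1) (by rw [hs0]; exact hf) (le_refl 0)
            have hr : Reach s1 ('L' :: e') := by
              refine ih s1 _ ?_ ⟨by rw [hlen1]; simpa using hlen, by rw [hv]; exact hf1⟩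
              have hmu1 : mu2 s1 ('L' :: e') = leadX s1 := by simp [mu2]
              have hmu2 : mu2 ('X' :: s') ('L' :: e') = leadX ('X' :: s') := by simp [mu2]
              rw [hmu1, hlen1]
              rw [hmu2] at hm
              simp only [List.length_cons] at hm ⊢
              exact measure_same hm hlt
            exact Relation.ReflTransGen.head hstep hr
          · have hs0 : nonX (cs :: s') 0 = (0, cs) :: nonX s' 1 := by simp [nonX, hcs]
            rw [hs0, hv] at hf
            obtain ⟨hp, htail⟩ := List.forall₂_cons.mp hf
            have hcc : cs = ce := hp.1
            subst hcc
            have hf' : List.Forall₂ pairOK (nonX s' 0) (nonX e' 0) := by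
              rw [show (1 : Nat) = 0 + 1 from rfl, nonX_shift s' 0, nonX_shift e' 0] at htail
              exact (forall₂_shift_iff _ _).mp htail
            have hr : Reach s' e' := by
              refine ih s' e' ?_ ⟨hlen', hf'⟩
              refine measure_dec (by simpa using hm) (mu2_le s' e')
            exact reach_cons cs hr

-- membership in the accumulator loop of pvFlips
theorem foldl_if_append_mem {α β : Type} (P : α → Prop) [DecidablePred P] (f : α → β) :
    ∀ (l : List α) (init : List β) (x : β),
      (x ∈ l.foldl (fun acc i => if P i then acc ++ [f i] else acc) init) ↔
        (x ∈ init ∨ ∃ i ∈ l, P i ∧ x = f i) := by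
  intro l
  induction l with
  | nil => simp
  | cons a l ih =>
    intro init x
    simp only [List.foldl_cons]
    by_cases hP : P a
    · rw [if_pos hP, ih]
      simp only [List.mem_append, List.mem_cons, List.not_mem_nil, or_false]
      constructor
      · rintro ((h | h) | ⟨i, hi, hPi, rfl⟩)
        · exact Or.inl h
        · exact Or.inr ⟨a, Or.inl rfl, hP, h⟩
        · exact Or.inr ⟨i, Or.inr hi, hPi, rfl⟩
      · rintro (h | ⟨i, hi | hi, hPi, rfl⟩)
        · exact Or.inl (Or.inl h)
        · subst hi; exact Or.inl (Or.inr rfl)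
        · exact Or.inr ⟨i, hi, hPi, rfl⟩
    · rw [if_neg hP, ih]
      simp only [List.mem_cons]
      constructor
      · rintro (h | ⟨i, hi, hPi, rfl⟩)
        · exact Or.inl h
        · exact Or.inr ⟨i, Or.inr hi, hPi, rfl⟩
      · rintro (h | ⟨i, hi | hi, hPi, rfl⟩)
        · exact Or.inl h
        · subst hi; exact absurd hPi hP
        · exact Or.inr ⟨i, hi, hPi, rfl⟩

theorem foldl_if_append_length {α β : Type} (P : α → Prop) [DecidablePred P] (f : α → β) :
    ∀ (l : List α) (init : List β),
      (l.foldl (fun acc i => if P i then acc ++ [f i] else acc) init).length ≤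
        init.length + l.length := by
  intro l
  induction l with
  | nil => simp
  | cons a l ih =>
    intro init
    simp only [List.foldl_cons, List.length_cons]
    by_cases hP : P a
    · rw [if_pos hP]
      have := ih (init ++ [f a])
      simp at this
      omega
    · rw [if_neg hP]
      have := ih init
      omega

theorem pvFlips_mem (tmp : List Char) (c d c' d' : Char) (x : List Char) :
    x ∈ pvFlips tmp [c, d] [c', d'] ↔
      ∃ a b, tmp = a ++ c :: d :: b ∧ x = a ++ c' :: d' :: b := by
  unfold pvFlips
  rw [foldl_if_append_mem (fun i => PySem.List.slice tmp (some i) (some (i + 2)) = [c, d])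
    (fun i => PySem.List.slice tmp none (some i) ++ [c', d'] ++ PySem.List.slice tmp (some (i + 2)) none)]
  simp only [List.not_mem_nil, false_or, PySem.List.mem_pyRange_one, PySem.List.len_eq]
  constructor
  · rintro ⟨i, ⟨hi0, hi1⟩, hP, rfl⟩
    obtain ⟨k, rfl⟩ : ∃ k : Nat, i = (k : Int) := ⟨i.toNat, (Int.toNat_of_nonneg hi0).symm⟩
    have hkn : k + 1 < tmp.length := by omega
    have hi2 : ((k : Int) + 2) = ((k + 2 : Nat) : Int) := by push_cast; ring
    have hP' : (tmp.drop k).take 2 = [c, d] := by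
      rw [hi2, PySem.List.slice_natCast] at hP
      rw [show k + 2 - k = 2 from by omega] at hP
      exact hP
    have hdrop : tmp.drop k = c :: d :: tmp.drop (k + 2) := by
      have h2 := List.take_append_drop 2 (tmp.drop k)
      rw [hP'] at h2
      rw [← h2, List.drop_drop]
      simp
    refine ⟨tmp.take k, tmp.drop (k + 2), ?_, ?_⟩
    · conv_lhs => rw [← List.take_append_drop k tmp]
      rw [hdrop]
    · rw [hi2, PySem.List.slice_to_natCast, PySem.List.slice_from_natCast]
      simp
  · rintro ⟨a, b, rfl, rfl⟩
    refine ⟨(a.length : Int), ⟨by positivity, ?_⟩, ?_, ?_⟩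
    · have : (a ++ c :: d :: b).length = a.length + b.length + 2 := by simp; omega
      rw [this]
      push_cast
      omega
    · rw [show ((a.length : Int) + 2) = ((a.length + 2 : Nat) : Int) by push_cast; ring,
        PySem.List.slice_natCast]
      rw [show a.length + 2 - a.length = 2 by omega]
      rw [List.drop_append_of_le_length (by simp)]
      simp
    · rw [show ((a.length : Int) + 2) = ((a.length + 2 : Nat) : Int) by push_cast; ring,
        PySem.List.slice_to_natCast, PySem.List.slice_from_natCast]
      rw [show a ++ c :: d :: b = (a ++ [c, d]) ++ b from by simp]
      rw [List.take_append_of_le_length (by simp), List.drop_left' (by simp)]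
      simp

theorem pvSuccs_iff (tmp x : List Char) : x ∈ pvSuccs tmp ↔ SwapStep tmp x := by
  unfold pvSuccs SwapStep
  rw [List.mem_append, pvFlips_mem, pvFlips_mem]

theorem pvFlips_length_le (tmp pat rep : List Char) :
    (pvFlips tmp pat rep).length ≤ tmp.length := by
  unfold pvFlips
  refine le_trans (foldl_if_append_length _ _ _ _) ?_
  simp [PySem.List.length_pyRange_one]

theorem pvSuccs_length_le (tmp : List Char) : (pvSuccs tmp).length ≤ 2 * tmp.length := by
  unfold pvSuccs
  have h1 := pvFlips_length_le tmp ['X', 'L'] ['L', 'X']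
  have h2 := pvFlips_length_le tmp ['R', 'X'] ['X', 'R']
  simp only [List.length_append]
  omega

-- escape from a Step-closed visited set
theorem escape {V S : List (List Char)}
    (hcl : ∀ k ∈ V, ∀ x, SwapStep k x → x ∈ V ∨ x ∈ S) :
    ∀ {k z}, k ∈ V → Reach k z → z ∈ V ∨ ∃ x ∈ S, Reach x z := by
  intro k z hk hr
  revert hk
  induction hr using Relation.ReflTransGen.head_induction_on with
  | refl => intro hz; exact Or.inl hz
  | head hstep htail ihc =>
    rename_i a c
    intro ha
    rcases hcl a ha c hstep with hcV | hcS
    · exact ihc hcV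
    · exact Or.inr ⟨c, hcS, htail⟩

theorem bfs_sound (s0 e : List Char) :
    ∀ (fuel : Nat) (stack : List (List Char)) (visit : PySem.Dict (List Char) Bool),
      (∀ x ∈ stack, Reach s0 x) → pvBfs e fuel stack visit = true → Reach s0 e := by
  intro fuel
  induction fuel with
  | zero => intro stack visit _ h; simp [pvBfs] at h
  | succ f ih =>
    intro stack visit hst h
    cases stack with
    | nil => simp [pvBfs] at h
    | cons tmp rest =>
      simp only [pvBfs] at h
      split_ifs at h with h1 h2
      · exact ih rest visit (fun x hx => hst x (List.mem_cons_of_mem _ hx)) h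
      · exact h2 ▸ hst tmp List.mem_cons_self
      · refine ih _ _ ?_ h
        intro x hx
        rcases List.mem_append.mp hx with hx1 | hx2
        · exact Relation.ReflTransGen.tail (hst tmp List.mem_cons_self)
            ((pvSuccs_iff tmp x).mp (List.mem_reverse.mp hx1))
        · exact hst x (List.mem_cons_of_mem _ hx2)

theorem bfs_complete (s0 e : List Char) (he : Reach s0 e) :
    ∀ (fuel : Nat) (stack : List (List Char)) (visit : PySem.Dict (List Char) Bool),
      (∀ x ∈ stack, Reach s0 x) →
      (∀ k ∈ visit.keys, Reach s0 k) →
      e ∉ visit.keys →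
      visit.keys.Nodup →
      (∀ k ∈ visit.keys, ∀ x, SwapStep k x → x ∈ visit.keys ∨ x ∈ stack) →
      (∀ z, Reach s0 z → z ∈ visit.keys ∨ ∃ x ∈ stack, Reach x z) →
      (Nat.factorial s0.length + 1 - visit.keys.length) * (2 * s0.length + 4) + stack.length + 1 ≤ fuel →
      pvBfs e fuel stack visit = true := by
  intro fuel
  induction fuel with
  | zero =>
    intro stack visit _ _ _ _ _ _ hm
    exfalso
    generalize hT : (Nat.factorial s0.length + 1 - visit.keys.length) * (2 * s0.length + 4) = T at hm
    omega
  | succ f ih =>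
    intro stack visit hst hkeys hem hnodup hcl hfront hm
    cases stack with
    | nil =>
      exfalso
      rcases hfront e he with h | ⟨x, hx, _⟩
      · exact hem h
      · simp at hx
    | cons tmp rest =>
      simp only [pvBfs]
      split_ifs with h1 h2
      · have htmpk : tmp ∈ visit.keys := (PySem.Dict.contains_iff_mem_keys _ _).mp h1
        have hcl' : ∀ k ∈ visit.keys, ∀ y, SwapStep k y → y ∈ visit.keys ∨ y ∈ rest := by
          intro k hk y hy
          rcases hcl k hk y hy with h | h
          · exact Or.inl h
          · rcases List.mem_cons.mp h with rfl | h'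
            · exact Or.inl htmpk
            · exact Or.inr h'
        refine ih rest visit (fun x hx => hst x (List.mem_cons_of_mem _ hx)) hkeys hem hnodup
          hcl' ?_ ?_
        · intro z hz
          rcases hfront z hz with h | ⟨x, hx, hr⟩
          · exact Or.inl h
          · rcases List.mem_cons.mp hx with rfl | hx'
            · exact escape hcl' htmpk hr
            · exact Or.inr ⟨x, hx', hr⟩
        · simp only [List.length_cons] at hm
          generalize hT : (Nat.factorial s0.length + 1 - visit.keys.length) * (2 * s0.length + 4) = T at hm ⊢
          omega
      · rfl
      · have hcf : visit.contains tmp = false := Bool.not_eq_true _ |>.mp h1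
        have htmpnk : tmp ∉ visit.keys :=
          fun hmem => h1 ((PySem.Dict.contains_iff_mem_keys _ _).mpr hmem)
        have hkeys' : (visit.insert tmp true).keys = visit.keys ++ [tmp] :=
          PySem.Dict.keys_insert_of_not_contains visit true hcf
        have hreach_tmp : Reach s0 tmp := hst tmp List.mem_cons_self
        have hn : tmp.length = s0.length := ((reach_perm hreach_tmp).length_eq).symm
        have hkb : visit.keys.length ≤ Nat.factorial s0.length := by
          have hsub : visit.keys ⊆ s0.permutations := fun k hk =>
            List.mem_permutations.mpr ((reach_perm (hkeys k hk)).symm)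
          calc visit.keys.length = visit.keys.toFinset.card :=
                (List.toFinset_card_of_nodup hnodup).symm
            _ ≤ s0.permutations.toFinset.card :=
                Finset.card_le_card
                  (fun y hy => List.mem_toFinset.mpr (hsub (List.mem_toFinset.mp hy)))
            _ ≤ s0.permutations.length := List.toFinset_card_le _
            _ = Nat.factorial s0.length := List.length_permutations s0
        refine ih ((pvSuccs tmp).reverse ++ rest) (visit.insert tmp true) ?_ ?_ ?_ ?_ ?_ ?_ ?_
        · intro x hx
          rcases List.mem_append.mp hx with hx1 | hx2
          · exact Relation.ReflTransGen.tail hreach_tmp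
              ((pvSuccs_iff tmp x).mp (List.mem_reverse.mp hx1))
          · exact hst x (List.mem_cons_of_mem _ hx2)
        · intro k hk
          rw [hkeys'] at hk
          rcases List.mem_append.mp hk with hk1 | hk2
          · exact hkeys k hk1
          · rw [List.mem_singleton.mp hk2]
            exact hreach_tmp
        · rw [hkeys']
          intro hmem
          rcases List.mem_append.mp hmem with h | h
          · exact hem h
          · exact h2 (List.mem_singleton.mp h).symm
        · exact PySem.Dict.nodup_keys_insert visit tmp true hnodup
        · intro k hk x hx
          rw [hkeys'] at hk ⊢
          rcases List.mem_append.mp hk with hk1 | hk2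
          · rcases hcl k hk1 x hx with h | h
            · exact Or.inl (List.mem_append_left _ h)
            · rcases List.mem_cons.mp h with rfl | h'
              · exact Or.inl (List.mem_append_right _ (List.mem_singleton.mpr rfl))
              · exact Or.inr (List.mem_append_right _ h')
          · obtain rfl := List.mem_singleton.mp hk2
            exact Or.inr
              (List.mem_append_left _ (List.mem_reverse.mpr ((pvSuccs_iff k x).mpr hx)))
        · intro z hz
          rcases hfront z hz with h | ⟨x, hx, hr⟩
          · exact Or.inl (by rw [hkeys']; exact List.mem_append_left _ h)
          · rcases List.mem_cons.mp hx with rfl | hx'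
            · rcases Relation.ReflTransGen.cases_head hr with rfl | ⟨y, hy1, hy2⟩
              · exact Or.inl
                  (by rw [hkeys']; exact List.mem_append_right _ (List.mem_singleton.mpr rfl))
              · exact Or.inr
                  ⟨y, List.mem_append_left _ (List.mem_reverse.mpr ((pvSuccs_iff x y).mpr hy1)), hy2⟩
            · exact Or.inr ⟨x, List.mem_append_right _ hx', hr⟩
        · rw [hkeys']
          simp only [List.length_append, List.length_cons, List.length_reverse,
            List.length_nil] at hm ⊢
          have hsl := pvSuccs_length_le tmp
          rw [hn] at hsl
          rw [show Nat.factorial s0.length + 1 - visit.keys.length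
              = (Nat.factorial s0.length - visit.keys.length) + 1 from by omega] at hm
          rw [show Nat.factorial s0.length + 1 - (visit.keys.length + 1)
              = Nat.factorial s0.length - visit.keys.length from by omega]
          rw [Nat.succ_mul] at hm
          generalize hT :
            (Nat.factorial s0.length - visit.keys.length) * (2 * s0.length + 4) = T at hm ⊢
          omega

-- assembly: A's count pre-check plus DFS agree with B's two-pointer scan
theorem a_eq (start end_ : String) :
    canTransform_TLE start end_ = canTransform_TLE_alt start end_ := by
  by_cases hC : Cond start.toList end_.toList
  · have hreach : Reach start.toList end_.toList := cond_reach _ _ _ le_rfl hC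
    have hperm := reach_perm hreach
    have halt : canTransform_TLE_alt start end_ = true := (alt_iff _ _).mpr hC
    rw [halt]
    unfold canTransform_TLE
    simp only [hperm.count_eq, ne_eq, not_true_eq_false, if_false]
    apply bfs_complete start.toList end_.toList hreach
    · intro x hx
      obtain rfl := List.mem_singleton.mp hx
      exact Relation.ReflTransGen.refl
    · simp [PySem.Dict.keys_empty]
    · simp [PySem.Dict.keys_empty]
    · simp [PySem.Dict.keys_empty]
    · simp [PySem.Dict.keys_empty]
    · intro z hz
      exact Or.inr ⟨start.toList, List.mem_singleton.mpr rfl, hz⟩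
    · simp only [PySem.Dict.keys_empty, List.length_nil, List.length_cons, Nat.sub_zero, pvFuel]
      generalize hT : (Nat.factorial start.toList.length + 1) * (2 * start.toList.length + 4) = T
      omega
  · have halt : canTransform_TLE_alt start end_ = false :=
      Bool.eq_false_iff.mpr (fun h => hC ((alt_iff _ _).mp h))
    rw [halt]
    unfold canTransform_TLE
    by_cases hL : start.toList.count 'L' ≠ end_.toList.count 'L'
    · rw [if_pos hL]
    · rw [if_neg hL]
      by_cases hR : start.toList.count 'R' ≠ end_.toList.count 'R'
      · rw [if_pos hR]
      · rw [if_neg hR]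
        by_cases hX : start.toList.count 'X' ≠ end_.toList.count 'X'
        · rw [if_pos hX]
        · rw [if_neg hX]
          refine Bool.eq_false_iff.mpr
            (fun h => hC (cond_of_reach (bfs_sound start.toList end_.toList _ _ _ ?_ h)))
          intro x hx
          obtain rfl := List.mem_singleton.mp hx
          exact Relation.ReflTransGen.refl

-- ===== VERDICT (by name: the statement is the Claim_ definition above) =====
theorem canTransform_TLE_spec : Claim_equal_canTransform_TLE := by
  intro start end_ _
  unfold Spec_canTransform_TLE
  exact a_eq start end_
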